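-- pv_equiv track=rewrite | github.com/sanskar-IT/laughing-octo-adventure | backend_fastapi/api/routes/tts.py | validate_text
-- ===== SOURCE A (Python) =====
-- MAX_TEXT_LENGTH = 5000
--
-- def validate_text(text: str) -> tuple[bool, str]:
--     """
--     Validate text for TTS.
--
--     Returns (is_valid, error_message_or_cleaned_text)
--     """
--     if not text or not text.strip():
--         return False, "Text cannot be empty"
--
--     # Check for dangerous characters (basic injection protection)
--     dangerous_chars = ['<', '>', '&', '"', "'", '\\', '\x00']
--     for char in dangerous_chars:
--         if char in text:
--             text = text.replace(char, '')
--
--     if len(text) > MAX_TEXT_LENGTH: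
--         return False, f"Text too long (max {MAX_TEXT_LENGTH} characters)"
--
--     return True, text.strip()
-- ===== SOURCE B (Python) =====
-- MAX_TEXT_LENGTH = 5000
--
-- def validate_text(text: str) -> tuple[bool, str]:
--     if not text.strip():
--         return False, "Text cannot be empty"
--     out = []
--     for c in text:
--         if c not in ('<', '>', '&', '"', "'", '\\', '\x00'):
--             out.append(c)
--     if len(out) > MAX_TEXT_LENGTH:
--         return False, f"Text too long (max {MAX_TEXT_LENGTH} characters)"
--     return True, ''.join(out).strip()
-- ===== Notes on version B (the rewrite author's own statement) =====
-- stated objective: idiomatic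
-- what changed: Replaces A's loop of up to 7 membership-scan-plus-replace passes over the whole text with one explicit single pass that copies each character into an accumulator list unless it is dangerous, and folds A's redundant empty-string test into the single strip-emptiness guard.
import Mathlib
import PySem

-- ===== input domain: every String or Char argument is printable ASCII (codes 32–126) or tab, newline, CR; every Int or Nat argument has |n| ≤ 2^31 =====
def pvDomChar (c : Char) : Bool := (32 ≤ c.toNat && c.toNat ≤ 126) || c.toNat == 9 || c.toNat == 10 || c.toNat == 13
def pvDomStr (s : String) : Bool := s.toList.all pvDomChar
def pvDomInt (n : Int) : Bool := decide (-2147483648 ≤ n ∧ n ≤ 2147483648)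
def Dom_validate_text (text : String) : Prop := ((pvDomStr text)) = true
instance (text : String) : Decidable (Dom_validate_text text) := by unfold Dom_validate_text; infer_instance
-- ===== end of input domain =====

-- B replaces A's loop of per-character replace passes with one explicit accumulator pass
-- copying each non-dangerous character, and folds the redundant empty test into the strip guard (idiomatic; same return value).

-- ===== PORT A =====
-- dangerous_chars = ['<', '>', '&', '"', "'", '\\', '\x00']
def pvDangerousA : List String :=
  [String.ofList ['<'], String.ofList ['>'], String.ofList ['&'], String.ofList ['"'],
   String.ofList ['\''], String.ofList ['\\'], String.ofList ['\x00']]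

def validate_text (text : String) : Bool × String :=
  if text = "" ∨ PySem.Str.strip text = "" then (false, "Text cannot be empty")
  else
    let text := pvDangerousA.foldl
      (fun t ch => if PySem.Str.isIn ch t then PySem.Str.replace t ch "" else t) text
    if PySem.Str.len text > 5000 then (false, "Text too long (max 5000 characters)")
    else (true, PySem.Str.strip text)

-- ===== PORT B =====
-- the for-loop: out starts [], each character not in the dangerous tuple is appended
def pvCleanLoop (out : List Char) : List Char → List Char
  | [] => out
  | c :: rest =>
      pvCleanLoop (if ['<', '>', '&', '"', '\'', '\\', '\x00'].contains c then out else out ++ [c]) rest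

def validate_text_alt (text : String) : Bool × String :=
  if PySem.Str.strip text = "" then (false, "Text cannot be empty")
  else
    let out := pvCleanLoop [] text.toList
    if out.length > 5000 then (false, "Text too long (max 5000 characters)")
    else (true, PySem.Str.strip (String.ofList out))

-- ===== PRECONDITION & SPEC =====
def Spec_validate_text (text : String) (out : Bool × String) : Prop := out = validate_text_alt text
instance (text : String) (out : Bool × String) : Decidable (Spec_validate_text text out) := by unfold Spec_validate_text; infer_instance

-- ===== CLAIM (what is proved, stated in full; the proofs are below) =====
def Claim_equal_validate_text : Prop := ∀ (text : String), Dom_validate_text text → Spec_validate_text text (validate_text text)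

-- ===== LEMMAS AND PROOFS =====

-- A singleton list is an infix exactly when its element occurs.
theorem pv_singleton_infix_iff (c : Char) (s : List Char) : [c] <:+: s ↔ c ∈ s := by
  constructor
  · intro h; exact h.sublist.mem (List.mem_singleton_self c)
  · intro h; obtain ⟨a, b, rfl⟩ := List.append_of_mem h; exact ⟨a, b, by simp⟩

-- Chars.replace.go with a one-char pattern and empty replacement is a filter.
theorem pv_replace_go_filter (c : Char) (l : List Char) :
    ∀ (fuel : Nat) (acc : List Char), l.length ≤ fuel →
      PySem.Chars.replace.go [c] [] fuel l acc = acc.reverse ++ l.filter (fun x => !(x == c)) := by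
  induction l with
  | nil =>
      intro fuel acc _
      cases fuel <;> simp [PySem.Chars.replace.go]
  | cons c' t ih =>
      intro fuel acc hf
      cases fuel with
      | zero => simp at hf
      | succ fuel =>
        by_cases h : c' = c
        · subst h
          have hp : List.isPrefixOf [c'] (c' :: t) = true := by simp [List.isPrefixOf]
          simp only [PySem.Chars.replace.go, hp, if_pos]
          rw [show List.drop [c'].length (c' :: t) = t from rfl]
          simp only [List.reverse_nil, List.nil_append]
          rw [ih fuel acc (by simpa using Nat.succ_le_succ_iff.mp hf)]
          simp
        · have hp : List.isPrefixOf [c] (c' :: t) = false := by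
            simp [List.isPrefixOf]; exact fun hb => (h hb.symm).elim
          simp only [PySem.Chars.replace.go, hp, Bool.false_eq_true, if_false]
          rw [ih fuel (c' :: acc) (by simpa using Nat.succ_le_succ_iff.mp hf)]
          simp [h]

-- One step of A's loop (guarded single-char replace) is a filter, at the character level.
theorem pv_step_filter (c : Char) (s : List Char) :
    (if PySem.Chars.isIn [c] s then PySem.Chars.replace s [c] [] else s)
      = s.filter (fun x => !(x == c)) := by
  by_cases h : c ∈ s
  · have hin : PySem.Chars.isIn [c] s = true := by
      rw [PySem.Chars.isIn_iff_infix, pv_singleton_infix_iff]; exact h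
    rw [hin, if_pos rfl]
    show PySem.Chars.replace.go [c] [] s.length s [] = _
    rw [pv_replace_go_filter c s s.length [] (le_refl _)]
    simp
  · have hin : PySem.Chars.isIn [c] s = false := by
      rw [PySem.Chars.isIn_eq_false_iff, pv_singleton_infix_iff]; exact h
    rw [hin]
    simp only [Bool.false_eq_true, if_false]
    symm
    refine List.filter_eq_self.mpr (fun x hx => ?_)
    simp only [Bool.not_eq_eq_eq_not, Bool.not_true, beq_eq_false_iff_ne]
    exact fun he => h (he ▸ hx)

-- One step of A's loop at the string level, bridged to the character level.
theorem pv_step_str (t : String) (c : Char) :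
    ((if PySem.Str.isIn (String.ofList [c]) t
        then PySem.Str.replace t (String.ofList [c]) "" else t)).toList
      = t.toList.filter (fun x => !(x == c)) := by
  rw [← pv_step_filter c t.toList]
  have hiff : PySem.Str.isIn (String.ofList [c]) t = PySem.Chars.isIn [c] t.toList := by
    simp
  by_cases h : PySem.Chars.isIn [c] t.toList = true
  · rw [hiff, h]
    simp
  · rw [hiff, Bool.eq_false_iff.mpr h]
    simp

-- A's whole cleaning loop over single-char strings equals one filter on the char list.
theorem pv_fold_bridge (Lc : List Char) :
    ∀ (t : String),
      ((Lc.map (fun c => String.ofList [c])).foldl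
          (fun t ch => if PySem.Str.isIn ch t then PySem.Str.replace t ch "" else t) t).toList
        = t.toList.filter (fun x => !(Lc.contains x)) := by
  induction Lc with
  | nil => intro t; simp
  | cons c Lc ih =>
      intro t
      simp only [List.map_cons, List.foldl_cons]
      rw [ih, pv_step_str, List.filter_filter]
      refine List.filter_congr (fun x _ => ?_)
      simp [Bool.not_or, Bool.and_comm, beq_eq_decide]

-- B's accumulator loop is the same filter.
theorem pv_cleanLoop_eq (l : List Char) :
    ∀ (out : List Char),
      pvCleanLoop out l
        = out ++ l.filter (fun c => !(['<', '>', '&', '"', '\'', '\\', '\x00'].contains c)) := by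
  induction l with
  | nil => intro out; simp [pvCleanLoop]
  | cons c rest ih =>
      intro out
      rw [pvCleanLoop, ih, List.filter_cons]
      cases hc : (['<', '>', '&', '"', '\'', '\\', '\x00'] : List Char).contains c
      · simp only [Bool.not_false, if_true, Bool.false_eq_true, if_false,
          List.append_assoc, List.singleton_append]
      · simp only [Bool.not_true, if_true, Bool.false_eq_true, if_false]

-- A's cleaned string, as a char list, is that filter too.
theorem pv_clean_eq (text : String) :
    (pvDangerousA.foldl
        (fun t ch => if PySem.Str.isIn ch t then PySem.Str.replace t ch "" else t) text).toList
      = text.toList.filter (fun c => !(['<', '>', '&', '"', '\'', '\\', '\x00'].contains c)) := by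
  have hmap : pvDangerousA
      = (['<', '>', '&', '"', '\'', '\\', '\x00'] : List Char).map (fun c => String.ofList [c]) := rfl
  rw [hmap, pv_fold_bridge]

-- A's full guard collapses to B's strip guard.
theorem pv_guard_iff (text : String) :
    (text = "" ∨ PySem.Str.strip text = "") ↔ PySem.Str.strip text = "" := by
  constructor
  · rintro (rfl | h)
    · decide
    · exact h
  · exact Or.inr

-- ===== VERDICT (by name: the statement is the Claim_ definition above) =====
theorem validate_text_spec : Claim_equal_validate_text := by
  intro text _
  show validate_text text = validate_text_alt text
  unfold validate_text validate_text_alt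
  by_cases h : PySem.Str.strip text = ""
  · rw [if_pos (Or.inr h), if_pos h]
  · have hA : ¬ (text = "" ∨ PySem.Str.strip text = "") := fun hg => h ((pv_guard_iff text).mp hg)
    rw [if_neg hA, if_neg h]
    have hout := pv_cleanLoop_eq text.toList []
    simp only [List.nil_append] at hout
    have hstr : (pvDangerousA.foldl
        (fun t ch => if PySem.Str.isIn ch t then PySem.Str.replace t ch "" else t) text)
        = String.ofList (pvCleanLoop [] text.toList) := by
      apply String.toList_injective
      rw [pv_clean_eq text, hout]
      simp
    rw [hstr]
    have hlen : PySem.Str.len (String.ofList (pvCleanLoop [] text.toList))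
        = ((pvCleanLoop [] text.toList).length : Int) := by
      simp
    simp only [hlen, gt_iff_lt]
    by_cases hl : 5000 < (pvCleanLoop [] text.toList).length
    · rw [if_pos (by exact_mod_cast hl), if_pos hl]
    · rw [if_neg (by exact_mod_cast hl), if_neg hl]
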